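-- pv_equiv track=rewrite | github.com/cajammyeon/first-year-uom | COMP16321_Prog_1_Cwk_03/race_solution.py | find_draw
-- ===== SOURCE A (Python) =====
-- def find_draw(data) : #
--     seen_values = set()
--     draw_value = []
--
--     for value in data.values() :
--         if value in seen_values :
--             draw_value.append(value)
--         else :
--             seen_values.add(value)
--
--     draw_value = list(dict.fromkeys(draw_value))
--     return draw_value
-- ===== SOURCE B (Python) =====
-- def find_draw(data):
--     vals = list(data.values())
--     return [v for i, v in enumerate(vals) if vals[:i].count(v) == 1]
-- ===== Notes on version B (the rewrite author's own statement) =====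
-- stated objective: alternative
-- what changed: Replaces the stateful seen-set loop plus a separate dict.fromkeys dedup pass by a stateless comprehension over enumerate(values) that keeps a value exactly at its second occurrence (prefix count == 1), trading A's O(n) incremental state for a quadratic but state-free formulation.
import Mathlib
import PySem

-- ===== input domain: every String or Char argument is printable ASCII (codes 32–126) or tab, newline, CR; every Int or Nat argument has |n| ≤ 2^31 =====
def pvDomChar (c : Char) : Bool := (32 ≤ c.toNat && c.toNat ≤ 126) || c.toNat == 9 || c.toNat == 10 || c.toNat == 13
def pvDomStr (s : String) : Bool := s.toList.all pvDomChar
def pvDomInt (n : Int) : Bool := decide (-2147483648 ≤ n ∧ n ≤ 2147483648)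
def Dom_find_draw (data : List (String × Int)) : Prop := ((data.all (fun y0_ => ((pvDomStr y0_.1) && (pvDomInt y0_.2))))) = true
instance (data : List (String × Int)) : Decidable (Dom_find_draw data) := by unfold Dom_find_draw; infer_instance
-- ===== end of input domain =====

-- B replaces A's stateful seen-set loop plus dict.fromkeys dedup pass by a stateless
-- comprehension keeping each value exactly at its second occurrence (prefix count == 1);
-- alternative decomposition, same result and order (B is quadratic, A linear).


-- ===== PORT A =====
def find_draw (data : List (String × Int)) : List Int :=
  let st := (PySem.Dict.ofList data).values.foldl
    (fun (st : PySem.Set Int × List Int) value =>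
      if PySem.Set.contains st.1 value then (st.1, st.2 ++ [value])
      else (PySem.Set.add st.1 value, st.2))
    (PySem.Set.empty, [])
  PySem.List.dedup st.2

-- ===== PORT B =====
def find_draw_alt (data : List (String × Int)) : List Int :=
  let vals := (PySem.Dict.ofList data).values
  (PySem.List.enumerate vals).filterMap (fun p =>
    if PySem.List.count (PySem.List.slice vals none (some p.1)) p.2 = 1 then some p.2 else none)

-- ===== PRECONDITION & SPEC =====
def Spec_find_draw (data : List (String × Int)) (out : List Int) : Prop := out = find_draw_alt data
instance (data : List (String × Int)) (out : List Int) : Decidable (Spec_find_draw data out) := by unfold Spec_find_draw; infer_instance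

-- ===== CLAIM (what is proved, stated in full; the proofs are below) =====
def Claim_equal_find_draw : Prop := ∀ (data : List (String × Int)), Dom_find_draw data → Spec_find_draw data (find_draw data)

-- ===== LEMMAS AND PROOFS =====

-- B's comprehension as a function of the value list (proof abbreviation only).
def bcomp (vals : List Int) : List Int :=
  (PySem.List.enumerate vals).filterMap (fun p =>
    if PySem.List.count (PySem.List.slice vals none (some p.1)) p.2 = 1 then some p.2 else none)

-- A's loop as a function of the value list (proof abbreviation only).
def afold (vals : List Int) : PySem.Set Int × List Int :=
  vals.foldl
    (fun (st : PySem.Set Int × List Int) value =>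
      if PySem.Set.contains st.1 value then (st.1, st.2 ++ [value])
      else (PySem.Set.add st.1 value, st.2))
    (PySem.Set.empty, [])

theorem enum_bounds {xs : List Int} :
    ∀ (s : Int) (p : Int × Int), p ∈ PySem.List.enumerate xs s → s ≤ p.1 ∧ p.1 < s + xs.length := by
  induction xs with
  | nil => intro s p hp; simp [PySem.List.enumerate] at hp
  | cons x xs ih =>
    intro s p hp
    rw [PySem.List.enumerate_cons] at hp
    rcases List.mem_cons.mp hp with h | h
    · subst h; simp
    · have := ih (s + 1) p h
      simp only [List.length_cons]
      push_cast
      omega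

-- Appending one value to the value list appends it to B's output iff its prefix count is 1.
theorem bcomp_append_singleton (vs : List Int) (v : Int) :
    bcomp (vs ++ [v]) = bcomp vs ++ (if List.count v vs = 1 then [v] else []) := by
  unfold bcomp
  rw [PySem.List.enumerate_append, List.filterMap_append]
  congr 1
  · apply List.filterMap_congr
    intro p hp
    have hb := enum_bounds 0 p hp
    have h0 : (0:Int) ≤ p.1 := hb.1
    rw [PySem.List.slice_to _ h0, PySem.List.slice_to _ h0,
        List.take_append_of_le_length (by omega : p.1.toNat ≤ vs.length)]
  · have : PySem.List.enumerate [v] (0 + (vs.length : Int)) = [((vs.length : Int), v)] := by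
      simp [PySem.List.enumerate]
    rw [this]
    simp only [List.filterMap_cons, List.filterMap_nil]
    rw [PySem.List.slice_to _ (by positivity),
        show ((vs.length : Int)).toNat = vs.length by omega,
        List.take_left, PySem.List.count_eq]
    split_ifs <;> simp

-- Loop invariant for A, stated over the value list consumed so far.
theorem afold_inv (vs : List Int) :
    (∀ x, x ∈ (afold vs).1 ↔ x ∈ vs) ∧
    (∀ x, x ∈ (afold vs).2 ↔ 2 ≤ List.count x vs) ∧
    PySem.List.dedup (afold vs).2 = bcomp vs := by
  induction vs using List.reverseRecOn with
  | nil =>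
    refine ⟨by simp [afold, PySem.Set.empty], by simp [afold], ?_⟩
    simp [afold, bcomp, PySem.List.dedup, PySem.List.enumerate]
  | append_singleton vs v ih =>
    obtain ⟨hseen, hdraw, hded⟩ := ih
    have hstep : afold (vs ++ [v]) =
        (if PySem.Set.contains (afold vs).1 v then ((afold vs).1, (afold vs).2 ++ [v])
         else (PySem.Set.add (afold vs).1 v, (afold vs).2)) := by
      unfold afold; rw [List.foldl_append]; rfl
    rw [bcomp_append_singleton]
    by_cases hv : v ∈ vs
    · have hc : PySem.Set.contains (afold vs).1 v = true :=
        (PySem.Set.contains_iff _ _).mpr ((hseen v).mpr hv)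
      rw [hstep, if_pos hc]
      have hc1 : 1 ≤ List.count v vs := List.one_le_count_iff.mpr hv
      refine ⟨?_, ?_, ?_⟩
      · intro x; simp only [List.mem_append, List.mem_singleton]
        constructor
        · intro hx; exact Or.inl ((hseen x).mp hx)
        · rintro (hx | rfl)
          · exact (hseen x).mpr hx
          · exact (hseen x).mpr hv
      · intro x
        simp only [List.mem_append, List.mem_singleton, List.count_append]
        rw [hdraw x]
        by_cases hxv : x = v
        · subst hxv; simp; omega
        · simp [hxv, Ne.symm hxv]
      · rw [PySem.List.dedup_eq_ofList, PySem.Set.ofList_append_singleton,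
            ← PySem.List.dedup_eq_ofList]
        by_cases h2 : 2 ≤ List.count v vs
        · rw [PySem.Set.add_of_mem (by
            rw [PySem.List.dedup_eq_ofList, PySem.Set.mem_ofList]
            exact (hdraw v).mpr h2)]
          rw [hded, if_neg (by omega)]
          simp
        · have : List.count v vs = 1 := by omega
          rw [PySem.Set.add_of_not_mem (by
            rw [PySem.List.dedup_eq_ofList, PySem.Set.mem_ofList]
            intro hm; exact h2 ((hdraw v).mp hm))]
          rw [hded, if_pos this]
    · have hc : ¬ PySem.Set.contains (afold vs).1 v = true := by
        rw [PySem.Set.contains_iff]; intro hm; exact hv ((hseen v).mp hm)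
      rw [hstep, if_neg hc]
      have hc0 : List.count v vs = 0 := List.count_eq_zero.mpr hv
      refine ⟨?_, ?_, ?_⟩
      · intro x
        rw [PySem.Set.mem_add]
        simp only [List.mem_append, List.mem_singleton]
        rw [hseen x]
      · intro x
        simp only [List.count_append, List.count_singleton]
        rw [hdraw x]
        by_cases hxv : x = v
        · subst hxv; simp [hc0]
        · simp [Ne.symm hxv]
      · rw [hded, if_neg (by omega)]
        simp

-- ===== VERDICT (by name: the statement is the Claim_ definition above) =====
theorem find_draw_spec : Claim_equal_find_draw := by
  intro data _
  unfold Spec_find_draw find_draw find_draw_alt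
  exact (afold_inv ((PySem.Dict.ofList data).values)).2.2
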